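-- pv_equiv track=rewrite | github.com/smartdash-almasana/exeland | src/exceland_factory/layouts/__init__.py | _resolve_derived_inputs
-- ===== SOURCE A (Python) =====
-- def _resolve_derived_inputs(
--     derived_inputs: dict[str, str],
--     input_to_cell: dict[str, str],
--     derived_to_cell: dict[str, str],
--     spec_slug: str,
--     derived_id: str,
-- ) -> dict[str, str]:
--     """
--     Resuelve los inputs de una fórmula derived a referencias de celda.
--
--     derived_inputs: {placeholder: input_id o derived_id}
--     Retorna: {placeholder: cell_ref}
--     """
--     bindings: dict[str, str] = {}
--
--     for placeholder, ref_id in derived_inputs.items():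
--         # Primero buscar en inputs
--         if ref_id in input_to_cell:
--             bindings[placeholder] = input_to_cell[ref_id]
--         # Luego buscar en derived (referencia a otra fórmula)
--         elif ref_id in derived_to_cell:
--             bindings[placeholder] = derived_to_cell[ref_id]
--         else:
--             raise ValueError(
--                 f"Spec '{spec_slug}': derived '{derived_id}' referencia '{ref_id}' "
--                 f"que no existe en inputs ni en derived."
--             )
--
--     return bindings
-- ===== SOURCE B (Python) =====
-- def _resolve_derived_inputs(
--     derived_inputs: dict[str, str],
--     input_to_cell: dict[str, str],
--     derived_to_cell: dict[str, str],
--     spec_slug: str,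
--     derived_id: str,
-- ) -> dict[str, str]:
--     # Inverted traversal: instead of looking each ref_id up in the tables,
--     # scan the tables and push cells to the refs that want them.
--     wanted: dict[str, list[str]] = {}
--     for placeholder, ref_id in derived_inputs.items():
--         wanted.setdefault(ref_id, []).append(placeholder)
--     resolved: dict[str, str] = {}
--     # derived first, inputs second: an input cell overwrites on collision,
--     # matching the original 'inputs take priority' rule.
--     for table in (derived_to_cell, input_to_cell):
--         for ref_id, cell in table.items():
--             if ref_id in wanted:
--                 resolved[ref_id] = cell
--     for ref_id in wanted:
--         if ref_id not in resolved:
--             raise ValueError(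
--                 f"Spec '{spec_slug}': derived '{derived_id}' referencia '{ref_id}' "
--                 f"que no existe en inputs ni en derived."
--             )
--     return {placeholder: resolved[ref_id]
--             for placeholder, ref_id in derived_inputs.items()}
-- ===== Notes on version B (the rewrite author's own statement) =====
-- stated objective: alternative
-- what changed: Inverts the traversal: instead of looking each ref_id up in two tables, B builds a reverse index ref_id->placeholders, scans derived_to_cell then input_to_cell pushing cells onto the refs that want them (second scan overriding, preserving input priority), validates, and assembles the output in derived_inputs order.
import Mathlib
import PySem

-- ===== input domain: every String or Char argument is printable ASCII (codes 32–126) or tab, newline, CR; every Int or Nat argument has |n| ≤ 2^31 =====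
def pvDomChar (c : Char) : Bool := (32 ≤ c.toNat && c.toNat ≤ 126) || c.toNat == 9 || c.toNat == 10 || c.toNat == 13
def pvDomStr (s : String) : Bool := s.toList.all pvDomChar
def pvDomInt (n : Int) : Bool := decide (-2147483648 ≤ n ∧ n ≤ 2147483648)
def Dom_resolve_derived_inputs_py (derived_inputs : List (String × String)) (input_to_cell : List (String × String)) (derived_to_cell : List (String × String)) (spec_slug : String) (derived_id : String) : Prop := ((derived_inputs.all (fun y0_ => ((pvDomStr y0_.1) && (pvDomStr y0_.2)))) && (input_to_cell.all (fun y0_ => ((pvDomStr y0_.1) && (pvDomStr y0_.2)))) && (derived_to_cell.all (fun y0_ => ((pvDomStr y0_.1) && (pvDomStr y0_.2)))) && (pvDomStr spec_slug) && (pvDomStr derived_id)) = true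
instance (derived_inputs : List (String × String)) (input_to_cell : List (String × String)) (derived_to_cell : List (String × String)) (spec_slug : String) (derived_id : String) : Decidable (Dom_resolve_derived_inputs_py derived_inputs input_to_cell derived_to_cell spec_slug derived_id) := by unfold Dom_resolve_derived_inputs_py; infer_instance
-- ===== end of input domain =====

-- B inverts the traversal (objective: alternative): a reverse index ref_id -> placeholders is built,
-- then the two source tables are scanned (derived first, inputs second, overriding) pushing cells
-- onto the refs that want them, and the output is assembled in derived_inputs order.


-- ===== PORT A =====
-- Literal port of A: loop over derived_inputs.items(); 'ref_id in input_to_cell' / 'input_to_cell[ref_id]'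
-- are first-match association-list lookups (PySem.Dict.mk); the ValueError branch leaves bindings
-- unchanged — those inputs are excluded by Pre_.
def resolve_derived_inputs_py (derived_inputs : List (String × String)) (input_to_cell : List (String × String)) (derived_to_cell : List (String × String)) (_spec_slug : String) (_derived_id : String) : List (String × String) :=
  (derived_inputs.foldl
    (fun (bindings : PySem.Dict String String) pr =>
      if (PySem.Dict.mk input_to_cell).contains pr.2 then
        bindings.insert pr.1 ((PySem.Dict.mk input_to_cell).getD pr.2 "")
      else if (PySem.Dict.mk derived_to_cell).contains pr.2 then
        bindings.insert pr.1 ((PySem.Dict.mk derived_to_cell).getD pr.2 "")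
      else
        bindings)  -- raise ValueError(...): excluded by Pre_
    PySem.Dict.empty).items

-- ===== PORT B =====
-- Literal port of Source B. pvWanted = the reverse index loop (setdefault(...).append as Dict.modify);
-- pvScan = 'for ref_id, cell in table.items(): if ref_id in wanted: resolved[ref_id] = cell'.
def pvWanted (derived_inputs : List (String × String)) : PySem.Dict String (List String) :=
  derived_inputs.foldl (fun w pr => w.modify pr.2 [] (· ++ [pr.1])) PySem.Dict.empty

def pvScan (wanted : PySem.Dict String (List String)) (resolved : PySem.Dict String String)
    (table : List (String × String)) : PySem.Dict String String :=
  table.foldl (fun r pr => if wanted.contains pr.1 then r.insert pr.1 pr.2 else r) resolved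

def resolve_derived_inputs_py_alt (derived_inputs : List (String × String)) (input_to_cell : List (String × String)) (derived_to_cell : List (String × String)) (_spec_slug : String) (_derived_id : String) : List (String × String) :=
  let wanted := pvWanted derived_inputs
  -- 'for table in (derived_to_cell, input_to_cell): …' — two scans, inputs second (overriding)
  let resolved := pvScan wanted (pvScan wanted PySem.Dict.empty derived_to_cell) input_to_cell
  -- 'for ref_id in wanted: if ref_id not in resolved: raise ValueError(...)' — only outside Pre_
  -- final comprehension in derived_inputs order
  (derived_inputs.foldl
    (fun (b : PySem.Dict String String) pr => b.insert pr.1 (resolved.getD pr.2 ""))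
    PySem.Dict.empty).items

-- ===== PRECONDITION & SPEC =====
-- Pre_ excludes (a) inputs where some ref_id occurs in neither map — there Python A raises ValueError —
-- and (b) lists with duplicate keys in the two lookup maps, which a Python dict (the declared parameter
-- type) cannot represent, so their association-list reading is accidental.
def Pre_resolve_derived_inputs_py (derived_inputs : List (String × String)) (input_to_cell : List (String × String)) (derived_to_cell : List (String × String)) (_spec_slug : String) (_derived_id : String) : Prop :=
  (input_to_cell.map Prod.fst).Nodup ∧ (derived_to_cell.map Prod.fst).Nodup ∧
  ∀ pr ∈ derived_inputs, pr.2 ∈ input_to_cell.map Prod.fst ∨ pr.2 ∈ derived_to_cell.map Prod.fst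
instance (derived_inputs : List (String × String)) (input_to_cell : List (String × String)) (derived_to_cell : List (String × String)) (spec_slug : String) (derived_id : String) : Decidable (Pre_resolve_derived_inputs_py derived_inputs input_to_cell derived_to_cell spec_slug derived_id) := by unfold Pre_resolve_derived_inputs_py; infer_instance

def pvWitness_resolve_derived_inputs_py : (List (String × String)) × (List (String × String)) × (List (String × String)) × String × String :=
  ([("p", "x"), ("q", "y")], [("x", "A1")], [("y", "B2")], "spec", "der")

def Spec_resolve_derived_inputs_py (derived_inputs : List (String × String)) (input_to_cell : List (String × String)) (derived_to_cell : List (String × String)) (spec_slug : String) (derived_id : String) (out : List (String × String)) : Prop := out = resolve_derived_inputs_py_alt derived_inputs input_to_cell derived_to_cell spec_slug derived_id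
instance (derived_inputs : List (String × String)) (input_to_cell : List (String × String)) (derived_to_cell : List (String × String)) (spec_slug : String) (derived_id : String) (out : List (String × String)) : Decidable (Spec_resolve_derived_inputs_py derived_inputs input_to_cell derived_to_cell spec_slug derived_id out) := by unfold Spec_resolve_derived_inputs_py; infer_instance

-- ===== CLAIM (what is proved, stated in full; the proofs are below) =====
def Claim_equal_resolve_derived_inputs_py : Prop := ∀ (derived_inputs : List (String × String)) (input_to_cell : List (String × String)) (derived_to_cell : List (String × String)) (spec_slug : String) (derived_id : String), Dom_resolve_derived_inputs_py derived_inputs input_to_cell derived_to_cell spec_slug derived_id → Pre_resolve_derived_inputs_py derived_inputs input_to_cell derived_to_cell spec_slug derived_id → Spec_resolve_derived_inputs_py derived_inputs input_to_cell derived_to_cell spec_slug derived_id (resolve_derived_inputs_py derived_inputs input_to_cell derived_to_cell spec_slug derived_id)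

-- ===== LEMMAS AND PROOFS =====

-- get? through a dict-update loop: the updating pairs (last occurrence wins) shadow the base dict
theorem dict_get?_update {κ ν : Type} [BEq κ] [LawfulBEq κ] (ps : List (κ × ν)) (d : PySem.Dict κ ν) (k : κ) :
    (d.update ps).get? k = ((PySem.Dict.ofList ps).get? k).or (d.get? k) := by
  induction ps generalizing d with
  | nil => simp [PySem.Dict.update, PySem.Dict.ofList]
  | cons p t ih =>
    have hl : d.update (p :: t) = (d.insert p.1 p.2).update t := rfl
    have hr : PySem.Dict.ofList (p :: t) = (PySem.Dict.empty.insert p.1 p.2).update t := rfl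
    rw [hl, hr, ih, ih]
    cases hx : (PySem.Dict.ofList t).get? k with
    | some v => simp
    | none =>
      by_cases hk : k = p.1
      · subst hk
        simp [PySem.Dict.get?_insert_self]
      · rw [PySem.Dict.get?_insert_of_ne d p.2 hk,
            PySem.Dict.get?_insert_of_ne PySem.Dict.empty p.2 hk]
        simp

-- keys of ofList are the first components
theorem dict_get?_ofList_eq_none {κ ν : Type} [BEq κ] [LawfulBEq κ] (ps : List (κ × ν)) (k : κ)
    (h : k ∉ ps.map Prod.fst) : (PySem.Dict.ofList ps).get? k = none := by
  rw [PySem.Dict.get?_eq_none_iff_not_mem_keys]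
  have : (PySem.Dict.ofList ps).keys = PySem.Set.update PySem.Dict.empty.keys (ps.map Prod.fst) :=
    PySem.Dict.keys_foldl_insert_key ps Prod.fst (fun _ x => x.2) PySem.Dict.empty
  rw [this]
  simp only [PySem.Dict.keys_empty, PySem.Set.update_nil_left]
  rw [PySem.Set.mem_ofList]
  exact h

-- with unique keys, the insert-built dict and the raw association list agree on every lookup
theorem dict_get?_ofList_eq_mk {κ ν : Type} [BEq κ] [LawfulBEq κ] (ps : List (κ × ν))
    (h : (ps.map Prod.fst).Nodup) (k : κ) :
    (PySem.Dict.ofList ps).get? k = (PySem.Dict.mk ps).get? k := by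
  induction ps with
  | nil => simp [PySem.Dict.ofList, PySem.Dict.update, PySem.Dict.get?, PySem.Dict.empty]
  | cons p t ih =>
    have hr : PySem.Dict.ofList (p :: t) = (PySem.Dict.empty.insert p.1 p.2).update t := rfl
    rw [hr, dict_get?_update, PySem.Dict.get?_mk_cons]
    simp only [List.map_cons, List.nodup_cons] at h
    by_cases hk : k = p.1
    · subst hk
      rw [dict_get?_ofList_eq_none t p.1 h.1, PySem.Dict.get?_insert_self]
      simp
    · rw [ih h.2, PySem.Dict.get?_insert_of_ne PySem.Dict.empty p.2 hk,
          PySem.Dict.get?_empty, if_neg (fun hb => hk (eq_of_beq hb).symm)]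
      simp

-- a ref that appears in derived_inputs is a key of the reverse index
theorem wanted_contains (di : List (String × String)) (pr : String × String) (h : pr ∈ di) :
    (pvWanted di).contains pr.2 = true := by
  rw [pvWanted, PySem.Dict.contains_iff_mem_keys,
      PySem.Dict.keys_foldl_modify_key di Prod.snd [] (fun _ x => (· ++ [x.1])) PySem.Dict.empty]
  simp only [PySem.Dict.keys_empty, PySem.Set.update_nil_left]
  rw [PySem.Set.mem_ofList]
  exact List.mem_map_of_mem h

-- the value a scan leaves at a wanted key: last occurrence in the table, else the base value
theorem scan_get? (w : PySem.Dict String (List String)) (r : PySem.Dict String String)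
    (t : List (String × String)) (k : String) (hk : w.contains k = true) :
    (pvScan w r t).get? k = ((PySem.Dict.ofList t).get? k).or (r.get? k) := by
  induction t generalizing r with
  | nil => simp [pvScan, PySem.Dict.ofList, PySem.Dict.update]
  | cons p t ih =>
    have hl : pvScan w r (p :: t) =
        pvScan w (if w.contains p.1 then r.insert p.1 p.2 else r) t := rfl
    have hr : PySem.Dict.ofList (p :: t) = (PySem.Dict.empty.insert p.1 p.2).update t := rfl
    rw [hl, hr, ih, dict_get?_update]
    by_cases hkp : k = p.1
    · subst hkp
      rw [if_pos hk, PySem.Dict.get?_insert_self, PySem.Dict.get?_insert_self]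
      cases hx : (PySem.Dict.ofList t).get? p.1 <;> simp
    · rw [PySem.Dict.get?_insert_of_ne PySem.Dict.empty p.2 hkp, PySem.Dict.get?_empty]
      have : (if w.contains p.1 then r.insert p.1 p.2 else r).get? k = r.get? k := by
        split
        · exact PySem.Dict.get?_insert_of_ne r p.2 hkp
        · rfl
      rw [this]
      cases hx : (PySem.Dict.ofList t).get? k <;> simp

-- membership in the raw key list = contains on the association-list dict
theorem contains_mk_iff (l : List (String × String)) (k : String) :
    (PySem.Dict.mk l).contains k = true ↔ k ∈ l.map Prod.fst := by
  rw [PySem.Dict.contains_iff_mem_keys, PySem.Dict.keys_mk]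

-- value delivered by B's resolved dict = A's two-tier lookup, at a wanted key
theorem resolved_val (di itc dtc : List (String × String))
    (h1 : (itc.map Prod.fst).Nodup) (h2 : (dtc.map Prod.fst).Nodup)
    (pr : String × String) (hmem : pr ∈ di) :
    (pvScan (pvWanted di) (pvScan (pvWanted di) PySem.Dict.empty dtc) itc).getD pr.2 "" =
      if (PySem.Dict.mk itc).contains pr.2 then (PySem.Dict.mk itc).getD pr.2 ""
      else (PySem.Dict.mk dtc).getD pr.2 "" := by
  have hk := wanted_contains di pr hmem
  rw [PySem.Dict.getD_eq_get?_getD, scan_get? _ _ _ _ hk, scan_get? _ _ _ _ hk,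
      dict_get?_ofList_eq_mk itc h1, dict_get?_ofList_eq_mk dtc h2,
      PySem.Dict.get?_empty, PySem.Dict.contains_eq_isSome_get?]
  cases hx : (PySem.Dict.mk itc).get? pr.2 with
  | some v => simp [PySem.Dict.getD_eq_get?_getD, hx]
  | none => simp [PySem.Dict.getD_eq_get?_getD]

-- ===== VERDICT (by name: the statement is the Claim_ definition above) =====
theorem resolve_derived_inputs_py_spec : Claim_equal_resolve_derived_inputs_py := by
  intro di itc dtc ss did _hdom hpre
  obtain ⟨h1, h2, hres⟩ := hpre
  unfold Spec_resolve_derived_inputs_py resolve_derived_inputs_py resolve_derived_inputs_py_alt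
  congr 1
  apply PySem.List.foldl_congr_mem
  intro acc pr hmem
  rw [resolved_val di itc dtc h1 h2 pr hmem]
  by_cases hc : (PySem.Dict.mk itc).contains pr.2 = true
  · rw [if_pos hc, if_pos hc]
  · have hd : (PySem.Dict.mk dtc).contains pr.2 = true :=
      (contains_mk_iff dtc pr.2).mpr
        ((hres pr hmem).resolve_left (fun hh => hc ((contains_mk_iff itc pr.2).mpr hh)))
    rw [if_neg hc, if_neg hc, if_pos hd]
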